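-- pv_equiv track=rewrite | github.com/Romsm1/OAIP | lab5/gears.py | gears
-- ===== SOURCE A (Python) =====
-- def gears(gear_lists, n, m):
--     # Перебираем все шестерёнки из каждого списка
--     for i in range(len(gear_lists)):
--         for j in range(len(gear_lists[i])):
--             for k in range(i, len(gear_lists)):
--                 for l in range(len(gear_lists[k])):
--                     # Пропускаем одинаковые шестерёнки из одного списка
--                     if i == k and j == l:
--                         continue
--                     # Проверяем условие на передаточное число
--                     if gear_lists[i][j] * m == gear_lists[k][l] * n:
--                         return (gear_lists[i][j], gear_lists[k][l])
--     return (None, None)  # Если ничего не найдено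
-- ===== SOURCE B (Python) =====
-- def gears(gear_lists, n, m):
--     # Index every gear value -> its positions (list index, element index), in scan order.
--     pos = {}
--     flat = []
--     for k, row in enumerate(gear_lists):
--         for l, v in enumerate(row):
--             pos.setdefault(v, []).append((k, l))
--             flat.append((k, l, v))
--     for i, row in enumerate(gear_lists):
--         for j, a in enumerate(row):
--             t = a * m
--             if n == 0:
--                 if t != 0:
--                     continue
--                 # any gear in lists i.. other than (i, j) matches
--                 for (k, l, v) in flat:
--                     if k > i or (k == i and l != j):
--                         return (a, v)
--             else:
--                 if t % n != 0:
--                     continue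
--                 b = t // n
--                 for (k, l) in pos.get(b, ()):
--                     if k > i or (k == i and l != j):
--                         return (a, b)
--     return (None, None)
-- ===== Notes on version B (the rewrite author's own statement) =====
-- stated objective: faster
-- what changed: B replaces A's quadratic scan over all gear pairs by a one-pass value->positions hash index plus a flat position list; for each gear it computes the unique partner value via an exact-divisibility test and scans only that value's bucket (full flat scan only in the degenerate n==0 case).
import Mathlib
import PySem

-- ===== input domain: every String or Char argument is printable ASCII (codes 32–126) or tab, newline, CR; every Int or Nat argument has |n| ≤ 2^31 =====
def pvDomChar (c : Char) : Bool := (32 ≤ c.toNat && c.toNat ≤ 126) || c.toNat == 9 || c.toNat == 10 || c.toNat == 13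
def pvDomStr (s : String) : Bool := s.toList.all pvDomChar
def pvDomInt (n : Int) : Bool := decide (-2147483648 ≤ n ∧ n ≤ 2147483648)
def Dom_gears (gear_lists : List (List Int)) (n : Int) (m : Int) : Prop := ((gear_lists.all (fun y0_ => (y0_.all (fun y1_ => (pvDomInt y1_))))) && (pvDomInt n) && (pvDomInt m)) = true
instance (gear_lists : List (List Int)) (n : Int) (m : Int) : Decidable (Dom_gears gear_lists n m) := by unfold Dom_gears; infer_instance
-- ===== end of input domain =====

-- B replaces A's quadratic all-pairs scan by a value→positions index: for each gear it
-- computes the unique partner value (divisibility test) and scans only that value's bucket.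

-- ===== PORT A =====
-- innermost loop: for l in range(len(gear_lists[k])), skipping (i,k)-(j,l) clash
def gearsL (a n m : Int) (skip : Option Nat) : Nat → List Int → Option Int
  | _, [] => none
  | l, b :: rest =>
    if skip = some l then gearsL a n m skip (l+1) rest
    else if a * m = b * n then some b
    else gearsL a n m skip (l+1) rest

-- loop: for k in range(i, len(gear_lists))
def gearsK (a n m : Int) (i j : Nat) : Nat → List (List Int) → Option Int
  | _, [] => none
  | k, row :: rest =>
    match gearsL a n m (if i = k then some j else none) 0 row with
    | some b => some b
    | none => gearsK a n m i j (k+1) rest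

-- loop: for j in range(len(gear_lists[i]))
def gearsJ (n m : Int) (i : Nat) (suffix : List (List Int)) : Nat → List Int → Option (Int × Int)
  | _, [] => none
  | j, a :: rest =>
    match gearsK a n m i j i suffix with
    | some b => some (a, b)
    | none => gearsJ n m i suffix (j+1) rest

-- loop: for i in range(len(gear_lists))
def gearsI (n m : Int) : Nat → List (List Int) → Option (Int × Int)
  | _, [] => none
  | i, row :: rest =>
    match gearsJ n m i (row :: rest) 0 row with
    | some p => some p
    | none => gearsI n m (i+1) rest

def gears (gear_lists : List (List Int)) (n : Int) (m : Int) : Option Int × Option Int :=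
  match gearsI n m 0 gear_lists with
  | some (a, b) => (some a, some b)
  | none => (none, none)

-- ===== PORT B =====
-- k > i or (k == i and l != j)
def altReg (i j k l : Nat) : Bool := decide (i < k) || (k == i && !(l == j))

-- index-building loop over one row: pos.setdefault(v, []).append((k, l)); flat.append((k, l, v))
def altBuildRow (k : Nat) : Nat → List Int →
    PySem.Dict Int (List (Nat × Nat)) × List (Nat × Nat × Int) →
    PySem.Dict Int (List (Nat × Nat)) × List (Nat × Nat × Int)
  | _, [], st => st
  | l, v :: rest, (d, f) =>
    altBuildRow k (l+1) rest (d.modify v [] (· ++ [(k, l)]), f ++ [(k, l, v)])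

def altBuild : Nat → List (List Int) →
    PySem.Dict Int (List (Nat × Nat)) × List (Nat × Nat × Int) →
    PySem.Dict Int (List (Nat × Nat)) × List (Nat × Nat × Int)
  | _, [], st => st
  | k, row :: rest, st => altBuild (k+1) rest (altBuildRow k 0 row st)

-- for (k, l) in pos.get(b, ()): if region: return
def bucketFind (i j : Nat) : List (Nat × Nat) → Bool
  | [] => false
  | (k, l) :: rest => if altReg i j k l then true else bucketFind i j rest

-- for (k, l, v) in flat: if region: return (a, v)
def flatFind (i j : Nat) : List (Nat × Nat × Int) → Option Int
  | [] => none
  | (k, l, v) :: rest => if altReg i j k l then some v else flatFind i j rest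

-- main loop over one row: for j, a in enumerate(row)
def altJ (d : PySem.Dict Int (List (Nat × Nat))) (f : List (Nat × Nat × Int)) (n m : Int)
    (i : Nat) : Nat → List Int → Option (Int × Int)
  | _, [] => none
  | j, a :: rest =>
    let t := a * m
    if n = 0 then
      if t ≠ 0 then altJ d f n m i (j+1) rest
      else
        match flatFind i j f with
        | some v => some (a, v)
        | none => altJ d f n m i (j+1) rest
    else if PySem.Int.mod t n ≠ 0 then altJ d f n m i (j+1) rest
    else if bucketFind i j (d.getD (PySem.Int.floordiv t n) []) then
      some (a, PySem.Int.floordiv t n)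
    else altJ d f n m i (j+1) rest

-- main loop: for i, row in enumerate(gear_lists)
def altI (d : PySem.Dict Int (List (Nat × Nat))) (f : List (Nat × Nat × Int)) (n m : Int) :
    Nat → List (List Int) → Option (Int × Int)
  | _, [] => none
  | i, row :: rest =>
    match altJ d f n m i 0 row with
    | some p => some p
    | none => altI d f n m (i+1) rest

def gears_alt (gear_lists : List (List Int)) (n : Int) (m : Int) : Option Int × Option Int :=
  let st := altBuild 0 gear_lists (PySem.Dict.empty, [])
  match altI st.1 st.2 n m 0 gear_lists with
  | some (a, b) => (some a, some b)
  | none => (none, none)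

-- ===== PRECONDITION & SPEC =====
def Spec_gears (gear_lists : List (List Int)) (n : Int) (m : Int) (out : Option Int × Option Int) : Prop := out = gears_alt gear_lists n m
instance (gear_lists : List (List Int)) (n : Int) (m : Int) (out : Option Int × Option Int) : Decidable (Spec_gears gear_lists n m out) := by unfold Spec_gears; infer_instance

-- ===== CLAIM (what is proved, stated in full; the proofs are below) =====
def Claim_equal_gears : Prop := ∀ (gear_lists : List (List Int)) (n : Int) (m : Int), Dom_gears gear_lists n m → Spec_gears gear_lists n m (gears gear_lists n m)

-- ===== LEMMAS AND PROOFS =====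

-- canonical "first matching value" over an indexed row / indexed list of rows / a flat list
def firstV (P : Nat → Int → Bool) : Nat → List Int → Option Int
  | _, [] => none
  | l, v :: r => if P l v then some v else firstV P (l+1) r

def firstF (P : Nat → Nat → Int → Bool) : Nat → List (List Int) → Option Int
  | _, [] => none
  | k, row :: rest =>
    match firstV (P k) 0 row with
    | some v => some v
    | none => firstF P (k+1) rest

def ffind (P : Nat → Nat → Int → Bool) : List (Nat × Nat × Int) → Option Int
  | [] => none
  | (k, l, v) :: r => if P k l v then some v else ffind P r

def rowFlat (k : Nat) : Nat → List Int → List (Nat × Nat × Int)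
  | _, [] => []
  | l, v :: r => (k, l, v) :: rowFlat k (l+1) r

def flatten : Nat → List (List Int) → List (Nat × Nat × Int)
  | _, [] => []
  | k, row :: rest => rowFlat k 0 row ++ flatten (k+1) rest


-- the predicate A's inner double loop searches with
def aPred (i j : Nat) (a n m : Int) (k l : Nat) (v : Int) : Bool :=
  !decide (i = k ∧ j = l) && decide (a * m = v * n)

theorem firstV_congr (P Q : Nat → Int → Bool) (h : ∀ l v, P l v = Q l v) :
    ∀ (xs : List Int) (l0 : Nat), firstV P l0 xs = firstV Q l0 xs := by
  intro xs
  induction xs with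
  | nil => intro l0; rfl
  | cons v r ih => intro l0; simp only [firstV, h]; rw [ih]

theorem gearsL_eq (a n m : Int) (skip : Option Nat) :
    ∀ (xs : List Int) (l0 : Nat),
      gearsL a n m skip l0 xs
        = firstV (fun l v => !decide (skip = some l) && decide (a * m = v * n)) l0 xs := by
  intro xs
  induction xs with
  | nil => intro l0; rfl
  | cons v r ih =>
    intro l0
    by_cases hs : skip = some l0
    · simp only [gearsL, if_pos hs, firstV]
      rw [if_neg (by simp [hs] : ¬((!decide (skip = some l0) && decide (a * m = v * n)) = true))]
      exact ih _
    · by_cases hc : a * m = v * n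
      · simp [gearsL, firstV, hs, hc]
      · simp [gearsL, firstV, hs, hc, ih]

theorem gearsK_eq (a n m : Int) (i j : Nat) :
    ∀ (s : List (List Int)) (k0 : Nat),
      gearsK a n m i j k0 s = firstF (aPred i j a n m) k0 s := by
  intro s
  induction s with
  | nil => intro k0; rfl
  | cons row rest ih =>
    intro k0
    simp only [gearsK, firstF, gearsL_eq, ih]
    have hp : ∀ l v,
        (!decide ((if i = k0 then some j else none) = some l) && decide (a * m = v * n))
          = aPred i j a n m k0 l v := by
      intro l v
      by_cases hik : i = k0
      · subst hik
        by_cases hjl : j = l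
        · subst hjl; simp [aPred]
        · simp [aPred, hjl]
      · simp [aPred, hik]
    rw [firstV_congr _ _ hp]

theorem firstV_none (P : Nat → Int → Bool) (h : ∀ l v, P l v = false) :
    ∀ (xs : List Int) (l0 : Nat), firstV P l0 xs = none := by
  intro xs
  induction xs with
  | nil => intro l0; rfl
  | cons v r ih => intro l0; simp only [firstV, h]; exact ih _

theorem firstF_none (P : Nat → Nat → Int → Bool) (h : ∀ k l v, P k l v = false) :
    ∀ (s : List (List Int)) (k0 : Nat), firstF P k0 s = none := by
  intro s
  induction s with
  | nil => intro k0; rfl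
  | cons row rest ih =>
    intro k0
    simp only [firstF, firstV_none _ (h k0)]
    exact ih _

theorem firstF_none_lt (P : Nat → Nat → Int → Bool) (i : Nat)
    (h : ∀ k l v, k < i → P k l v = false) :
    ∀ (s : List (List Int)) (k0 : Nat), k0 + s.length ≤ i → firstF P k0 s = none := by
  intro s
  induction s with
  | nil => intro k0 _; rfl
  | cons row rest ih =>
    intro k0 hle
    simp only [List.length_cons] at hle
    have hk0 : k0 < i := by omega
    simp only [firstF, firstV_none _ (fun l v => h k0 l v hk0)]
    exact ih (k0 + 1) (by omega)

theorem firstF_append (P : Nat → Nat → Int → Bool) :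
    ∀ (xs ys : List (List Int)) (k0 : Nat),
      firstF P k0 (xs ++ ys)
        = match firstF P k0 xs with
          | some v => some v
          | none => firstF P (k0 + xs.length) ys := by
  intro xs
  induction xs with
  | nil => intro ys k0; simp [firstF]
  | cons row rest ih =>
    intro ys k0
    simp only [List.cons_append, firstF, List.length_cons]
    cases firstV (P k0) 0 row with
    | some v => rfl
    | none =>
      simp only []
      rw [ih]
      have : k0 + 1 + rest.length = k0 + (rest.length + 1) := by omega
      rw [this]

theorem firstF_congr_ge (P Q : Nat → Nat → Int → Bool) (i : Nat)
    (h : ∀ k l v, i ≤ k → P k l v = Q k l v) :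
    ∀ (s : List (List Int)) (k0 : Nat), i ≤ k0 → firstF P k0 s = firstF Q k0 s := by
  intro s
  induction s with
  | nil => intro k0 _; rfl
  | cons row rest ih =>
    intro k0 hk
    simp only [firstF]
    rw [firstV_congr _ _ (fun l v => h k0 l v hk), ih (k0 + 1) (by omega)]

theorem firstV_some (P : Nat → Int → Bool) :
    ∀ (xs : List Int) (l0 : Nat) (v : Int), firstV P l0 xs = some v → ∃ l, P l v = true := by
  intro xs
  induction xs with
  | nil => intro l0 v h; simp [firstV] at h
  | cons w r ih =>
    intro l0 v h
    simp only [firstV] at h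
    by_cases hp : P l0 w
    · rw [if_pos hp] at h
      exact ⟨l0, by cases h; exact hp⟩
    · rw [if_neg hp] at h
      exact ih _ _ h

theorem firstF_some (P : Nat → Nat → Int → Bool) :
    ∀ (s : List (List Int)) (k0 : Nat) (v : Int),
      firstF P k0 s = some v → ∃ k l, P k l v = true := by
  intro s
  induction s with
  | nil => intro k0 v h; simp [firstF] at h
  | cons row rest ih =>
    intro k0 v h
    simp only [firstF] at h
    cases hv : firstV (P k0) 0 row with
    | some w =>
      rw [hv] at h
      cases h
      obtain ⟨l, hl⟩ := firstV_some _ _ _ _ hv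
      exact ⟨k0, l, hl⟩
    | none =>
      rw [hv] at h
      exact ih _ _ h

theorem ffind_append (P : Nat → Nat → Int → Bool) :
    ∀ (xs ys : List (Nat × Nat × Int)),
      ffind P (xs ++ ys)
        = match ffind P xs with
          | some v => some v
          | none => ffind P ys := by
  intro xs
  induction xs with
  | nil => intro ys; simp [ffind]
  | cons p r ih =>
    intro ys
    obtain ⟨k, l, v⟩ := p
    simp only [List.cons_append, ffind]
    by_cases hp : P k l v
    · simp [hp]
    · simp [hp, ih]

theorem ffind_rowFlat (P : Nat → Nat → Int → Bool) (k : Nat) :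
    ∀ (xs : List Int) (l0 : Nat), ffind P (rowFlat k l0 xs) = firstV (P k) l0 xs := by
  intro xs
  induction xs with
  | nil => intro l0; rfl
  | cons v r ih => intro l0; simp only [rowFlat, ffind, firstV, ih]

theorem ffind_flatten (P : Nat → Nat → Int → Bool) :
    ∀ (s : List (List Int)) (k0 : Nat), ffind P (flatten k0 s) = firstF P k0 s := by
  intro s
  induction s with
  | nil => intro k0; rfl
  | cons row rest ih =>
    intro k0
    simp only [flatten, firstF, ffind_append, ffind_rowFlat, ih]

theorem flatFind_eq (i j : Nat) :
    ∀ (f : List (Nat × Nat × Int)),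
      flatFind i j f = ffind (fun k l _ => altReg i j k l) f := by
  intro f
  induction f with
  | nil => rfl
  | cons p r ih =>
    obtain ⟨k, l, v⟩ := p
    simp only [flatFind, ffind, ih]

theorem bucketFind_eq (i j : Nat) (b : Int) :
    ∀ (f : List (Nat × Nat × Int)),
      bucketFind i j ((f.filter (fun p => p.2.2 == b)).map (fun p => (p.1, p.2.1)))
        = (ffind (fun k l v => altReg i j k l && (v == b)) f).isSome := by
  intro f
  induction f with
  | nil => rfl
  | cons p r ih =>
    obtain ⟨k, l, v⟩ := p
    by_cases hv : v = b
    · subst hv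
      by_cases hr : altReg i j k l
      · simp [bucketFind, ffind, hr]
      · simp [bucketFind, ffind, hr, ih]
    · have hvb : (v == b) = false := by simp [hv]
      simp only [List.filter_cons]
      simp only [ffind, hvb, Bool.and_false]
      simpa [hvb] using ih

theorem buildRow_snd (k : Nat) :
    ∀ (xs : List Int) (l0 : Nat) (d : PySem.Dict Int (List (Nat × Nat)))
      (f : List (Nat × Nat × Int)),
      (altBuildRow k l0 xs (d, f)).2 = f ++ rowFlat k l0 xs := by
  intro xs
  induction xs with
  | nil => intro l0 d f; simp [altBuildRow, rowFlat]
  | cons v r ih =>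
    intro l0 d f
    simp only [altBuildRow, rowFlat, ih]
    simp

theorem buildRow_getD (k : Nat) (b : Int) :
    ∀ (xs : List Int) (l0 : Nat) (d : PySem.Dict Int (List (Nat × Nat)))
      (f : List (Nat × Nat × Int)),
      (altBuildRow k l0 xs (d, f)).1.getD b []
        = d.getD b [] ++ ((rowFlat k l0 xs).filter (fun p => p.2.2 == b)).map (fun p => (p.1, p.2.1)) := by
  intro xs
  induction xs with
  | nil => intro l0 d f; simp [altBuildRow, rowFlat]
  | cons v r ih =>
    intro l0 d f
    simp only [altBuildRow, rowFlat, ih]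
    rw [PySem.Dict.getD_modify]
    by_cases hv : b = v
    · subst hv
      simp
    · have hvb : (v == b) = false := by simp [Ne.symm hv]
      simp [hvb, if_neg hv]

theorem build_snd :
    ∀ (s : List (List Int)) (k0 : Nat) (d : PySem.Dict Int (List (Nat × Nat)))
      (f : List (Nat × Nat × Int)),
      (altBuild k0 s (d, f)).2 = f ++ flatten k0 s := by
  intro s
  induction s with
  | nil => intro k0 d f; simp [altBuild, flatten]
  | cons row rest ih =>
    intro k0 d f
    simp only [altBuild, flatten]
    have hst : altBuildRow k0 0 row (d, f)
        = ((altBuildRow k0 0 row (d, f)).1, (altBuildRow k0 0 row (d, f)).2) := rfl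
    rw [hst, ih, buildRow_snd, List.append_assoc]

theorem build_getD (b : Int) :
    ∀ (s : List (List Int)) (k0 : Nat) (d : PySem.Dict Int (List (Nat × Nat)))
      (f : List (Nat × Nat × Int)),
      (altBuild k0 s (d, f)).1.getD b []
        = d.getD b [] ++ ((flatten k0 s).filter (fun p => p.2.2 == b)).map (fun p => (p.1, p.2.1)) := by
  intro s
  induction s with
  | nil => intro k0 d f; simp [altBuild, flatten]
  | cons row rest ih =>
    intro k0 d f
    simp only [altBuild, flatten]
    have hst : altBuildRow k0 0 row (d, f)
        = ((altBuildRow k0 0 row (d, f)).1, (altBuildRow k0 0 row (d, f)).2) := rfl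
    rw [hst, ih, buildRow_getD, List.filter_append, List.map_append, List.append_assoc]

theorem altReg_lt {i j k l : Nat} (h : k < i) : altReg i j k l = false := by
  simp [altReg]
  omega

theorem altReg_ge {i j k l : Nat} (h : i ≤ k) :
    altReg i j k l = !decide (i = k ∧ j = l) := by
  by_cases hk : k = i
  · subst hk
    by_cases hj : j = l
    · subst hj; simp [altReg]
    · simp [altReg, hj, Ne.symm hj]
  · have hik : i < k := by omega
    simp [altReg, hik, Ne.symm hk]

theorem bridge (Q P : Nat → Nat → Int → Bool) (i : Nat) (pre s : List (List Int))
    (hlen : pre.length = i)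
    (hlt : ∀ k l v, k < i → Q k l v = false)
    (hge : ∀ k l v, i ≤ k → Q k l v = P k l v) :
    firstF Q 0 (pre ++ s) = firstF P i s := by
  rw [firstF_append, firstF_none_lt Q i hlt pre 0 (by omega)]
  simp only [Nat.zero_add, hlen]
  exact firstF_congr_ge _ _ i hge s i (le_refl i)

-- A's inner double loop vs B's n == 0 flat scan
theorem inner_zero (gls pre s : List (List Int)) (i j : Nat) (a n m : Int)
    (hg : gls = pre ++ s) (hlen : pre.length = i) (hn : n = 0) (ht : a * m = 0) :
    flatFind i j (flatten 0 gls) = gearsK a n m i j i s := by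
  subst hg hn
  rw [flatFind_eq, ffind_flatten, gearsK_eq]
  rw [bridge (fun k l _ => altReg i j k l) (aPred i j a 0 m) i pre s hlen
      (fun k l v hk => altReg_lt hk)
      (fun k l v hk => by simp [altReg_ge hk, aPred, ht])]

-- A's inner double loop finds nothing when no partner value can exist
theorem inner_none (gls pre s : List (List Int)) (i j : Nat) (a n m : Int)
    (hcond : ∀ v : Int, a * m ≠ v * n) :
    gearsK a n m i j i s = none := by
  rw [gearsK_eq]
  exact firstF_none _ (fun k l v => by simp [aPred, hcond v]) s i

-- A's inner double loop vs B's bucket scan (n ≠ 0, divisible case)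
theorem inner_bucket (gls pre s : List (List Int)) (i j : Nat) (a n m b : Int)
    (hg : gls = pre ++ s) (hlen : pre.length = i) (hn : n ≠ 0) (hb : b * n = a * m) :
    (if bucketFind i j (((flatten 0 gls).filter (fun p => p.2.2 == b)).map (fun p => (p.1, p.2.1)))
      then some b else none) = gearsK a n m i j i s := by
  subst hg
  have hiff : ∀ v : Int, (a * m = v * n) ↔ v = b := by
    intro v
    constructor
    · intro h
      have : v * n = b * n := by rw [hb, h]
      exact mul_right_cancel₀ hn this
    · intro h; subst h; exact hb.symm
  rw [bucketFind_eq, ffind_flatten, gearsK_eq]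
  rw [bridge (fun k l v => altReg i j k l && (v == b)) (aPred i j a n m) i pre s hlen
      (fun k l v hk => by simp [altReg_lt hk])
      (fun k l v hk => by
        simp only [altReg_ge hk, aPred]
        by_cases hv : v = b
        · simp [hv, (hiff b).mpr rfl]
        · have h1 : (v == b) = false := by simp [hv]
          have h2 : decide (a * m = v * n) = false := by
            simp only [decide_eq_false_iff_not]
            exact fun h => hv ((hiff v).mp h)
          rw [h1, h2])]
  cases hf : firstF (aPred i j a n m) i s with
  | none => simp
  | some x =>
    obtain ⟨k, l, hp⟩ := firstF_some _ _ _ _ hf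
    simp only [aPred, Bool.and_eq_true, decide_eq_true_eq] at hp
    have hx : x = b := (hiff x).mp hp.2
    simp [hx]

-- per-row correspondence of the two main loops
theorem altJ_eq_gearsJ (gls pre s : List (List Int))
    (d : PySem.Dict Int (List (Nat × Nat))) (f : List (Nat × Nat × Int)) (n m : Int) (i : Nat)
    (hg : gls = pre ++ s) (hlen : pre.length = i)
    (hd : ∀ b, d.getD b [] = ((flatten 0 gls).filter (fun p => p.2.2 == b)).map (fun p => (p.1, p.2.1)))
    (hf : f = flatten 0 gls) :
    ∀ (row : List Int) (j : Nat), altJ d f n m i j row = gearsJ n m i s j row := by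
  intro row
  induction row with
  | nil => intro j; rfl
  | cons a rest ih =>
    intro j
    by_cases hn : n = 0
    · subst hn
      by_cases ht : a * m = 0
      · have hK := inner_zero gls pre s i j a 0 m hg hlen rfl ht
        simp only [altJ, gearsJ, ne_eq, ht, not_true_eq_false, if_false, hf]
        rw [hK]
        cases gearsK a 0 m i j i s <;> simp [← hf, ih]
      · have hK : gearsK a 0 m i j i s = none := by
          apply inner_none gls pre s
          intro v
          rw [mul_zero]
          exact ht
        simp only [altJ, gearsJ, ne_eq, ht, not_false_eq_true, if_true]
        rw [hK, ih]
    · by_cases hm : PySem.Int.mod (a * m) n = 0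
      · have hbn : PySem.Int.floordiv (a * m) n * n = a * m := by
          have h0 := PySem.Int.floordiv_mul_add_mod (a * m) n
          rw [hm, add_zero] at h0
          exact h0
        have hK := inner_bucket gls pre s i j a n m (PySem.Int.floordiv (a * m) n) hg hlen hn hbn
        rw [← hd] at hK
        simp only [altJ, gearsJ, if_neg hn, ne_eq, hm, not_true_eq_false, if_false]
        rw [← hK]
        cases hbf : bucketFind i j (d.getD (PySem.Int.floordiv (a * m) n) []) <;>
          simp [ih]
      · have hK : gearsK a n m i j i s = none := by
          apply inner_none gls pre s
          intro v hv
          have hdvd : n ∣ a * m := ⟨v, by linarith [hv]⟩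
          rw [← PySem.Int.mod_eq_zero_iff_dvd] at hdvd
          exact hm hdvd
        simp only [altJ, gearsJ, if_neg hn, ne_eq, hm, not_false_eq_true, if_true]
        rw [hK, ih]

-- outer-loop correspondence
theorem altI_eq_gearsI (gls : List (List Int))
    (d : PySem.Dict Int (List (Nat × Nat))) (f : List (Nat × Nat × Int)) (n m : Int)
    (hd : ∀ b, d.getD b [] = ((flatten 0 gls).filter (fun p => p.2.2 == b)).map (fun p => (p.1, p.2.1)))
    (hf : f = flatten 0 gls) :
    ∀ (s pre : List (List Int)), gls = pre ++ s →
      altI d f n m pre.length s = gearsI n m pre.length s := by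
  intro s
  induction s with
  | nil => intro pre _; rfl
  | cons row rest ih =>
    intro pre hg
    simp only [altI, gearsI]
    rw [altJ_eq_gearsJ gls pre (row :: rest) d f n m pre.length hg rfl hd hf]
    cases gearsJ n m pre.length (row :: rest) 0 row with
    | some p => rfl
    | none =>
      simp only []
      have hg' : gls = (pre ++ [row]) ++ rest := by simp [hg]
      have := ih (pre ++ [row]) hg'
      simpa using this

-- ===== VERDICT (by name: the statement is the Claim_ definition above) =====
theorem gears_spec : Claim_equal_gears := by
  intro gls n m _
  unfold Spec_gears gears gears_alt
  have hf : (altBuild 0 gls (PySem.Dict.empty, [])).2 = flatten 0 gls := by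
    rw [build_snd]; simp
  have hd : ∀ b, (altBuild 0 gls (PySem.Dict.empty, [])).1.getD b []
      = ((flatten 0 gls).filter (fun p => p.2.2 == b)).map (fun p => (p.1, p.2.1)) := by
    intro b
    rw [build_getD]
    simp [PySem.Dict.getD_empty]
  have h := altI_eq_gearsI gls (altBuild 0 gls (PySem.Dict.empty, [])).1
    (altBuild 0 gls (PySem.Dict.empty, [])).2 n m hd hf gls [] rfl
  simp only [List.length_nil] at h
  show (match gearsI n m 0 gls with
        | some (a, b) => (some a, some b)
        | none => (none, none))
      = (match altI (altBuild 0 gls (PySem.Dict.empty, [])).1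
            (altBuild 0 gls (PySem.Dict.empty, [])).2 n m 0 gls with
        | some (a, b) => (some a, some b)
        | none => (none, none))
  rw [h]
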